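-- pv_equiv track=rewrite | github.com/jongmung/Coding_Study | studyct.py | solution
-- ===== SOURCE A (Python) =====
-- def solution(board, skill):
--     R, C = len(board), len(board[0])
--     delta = [[0] * (C+1) for _ in range(R+1)]
--
--     for op, rmin, cmin, rmax, cmax, degree in skill:
--         degree = -degree if op == 1 else degree
--
--         delta[rmin][cmin] += degree
--         delta[rmax+1][cmin] -= degree
--         delta[rmin][cmax+1] -= degree
--         delta[rmax+1][cmax+1] += degree
--
--     for r in range(R):
--         for c in range(1, C):
--             delta[r][c] += delta[r][c-1]
--
--     for c in range(C):
--         for r in range(1, R):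
--             delta[r][c] += delta[r-1][c]
--
--     return sum(board[r][c] + delta[r][c] > 0 for r in range(R) for c in range(C))
-- ===== SOURCE B (Python) =====
-- def solution(board, skill):
--     R, C = len(board), len(board[0])
--     delta = [[0] * (C + 1) for _ in range(R + 1)]
--     for op, rmin, cmin, rmax, cmax, degree in skill:
--         d = -degree if op == 1 else degree
--         delta[rmin][cmin] += d
--         delta[rmax + 1][cmin] -= d
--         delta[rmin][cmax + 1] -= d
--         delta[rmax + 1][cmax + 1] += d
--     count = 0
--     for r in range(R):
--         for c in range(C):
--             value = board[r][c] + sum(delta[i][j] for i in range(r + 1) for j in range(c + 1))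
--             if value > 0:
--                 count += 1
--     return count
-- ===== Notes on version B (the rewrite author's own statement) =====
-- stated objective: alternative
-- what changed: Keeps the difference-array corner marking but removes both in-place prefix-sum sweeps and the final generator sum: each cell's accumulated damage is obtained by directly summing the difference array over the cell's upper-left sub-rectangle, trading the O(R*C) dynamic-programming sweeps for a naive direct summation.
import Mathlib
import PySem

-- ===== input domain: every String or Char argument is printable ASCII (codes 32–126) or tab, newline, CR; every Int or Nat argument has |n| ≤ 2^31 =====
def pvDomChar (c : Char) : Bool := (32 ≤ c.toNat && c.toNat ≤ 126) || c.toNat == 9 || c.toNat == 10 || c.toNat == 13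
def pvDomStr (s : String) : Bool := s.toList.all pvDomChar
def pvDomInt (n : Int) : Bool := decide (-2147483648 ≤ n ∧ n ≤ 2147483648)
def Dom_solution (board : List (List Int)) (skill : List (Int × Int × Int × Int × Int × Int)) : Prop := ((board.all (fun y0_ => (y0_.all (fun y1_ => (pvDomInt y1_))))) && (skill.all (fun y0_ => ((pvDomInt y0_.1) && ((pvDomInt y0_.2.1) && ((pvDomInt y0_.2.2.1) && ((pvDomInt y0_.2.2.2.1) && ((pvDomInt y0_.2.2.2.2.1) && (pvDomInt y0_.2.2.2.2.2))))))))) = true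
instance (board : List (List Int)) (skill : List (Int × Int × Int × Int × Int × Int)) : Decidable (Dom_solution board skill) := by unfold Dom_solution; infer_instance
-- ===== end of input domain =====

-- B keeps the difference-array corner marking but drops both in-place prefix-sum sweeps:
-- each cell sums the difference array over its upper-left sub-rectangle directly
-- (alternative algorithm, same return value; neither implementation mutates its inputs).

-- ===== PORT A =====
-- Python list index normalisation (a negative index wraps); out-of-range writes are excluded by Pre_
def pvIdx (i : Int) (n : Nat) : Nat := (if i < 0 then i + (n : Int) else i).toNat

-- g[r][c] read with Python indexing (the defaults are only reachable outside Pre_)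
def pvGet2 (g : List (List Int)) (r c : Int) : Int :=
  PySem.List.pyGetD (PySem.List.pyGetD g r []) c 0

-- delta[r][c] += d
def pvAdd2 (g : List (List Int)) (r c d : Int) : List (List Int) :=
  g.modify (pvIdx r g.length) (fun row => row.modify (pvIdx c row.length) (fun v => v + d))

-- the four corner marks of one skill (this loop body is textually shared by A and B)
def pvStamp (g : List (List Int)) (s : Int × Int × Int × Int × Int × Int) : List (List Int) :=
  let degree := if s.1 == 1 then -s.2.2.2.2.2 else s.2.2.2.2.2
  pvAdd2 (pvAdd2 (pvAdd2 (pvAdd2 g s.2.1 s.2.2.1 degree)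
    (s.2.2.2.1 + 1) s.2.2.1 (-degree))
    s.2.1 (s.2.2.2.2.1 + 1) (-degree))
    (s.2.2.2.1 + 1) (s.2.2.2.2.1 + 1) degree

-- "for r in range(R): for c in range(1, C): delta[r][c] += delta[r][c-1]"
def pvHPass (g : List (List Int)) (R C : Nat) : List (List Int) :=
  (PySem.List.pyRange 0 (R : Int)).foldl
    (fun g r => (PySem.List.pyRange 1 (C : Int)).foldl
      (fun g c => pvAdd2 g r c (pvGet2 g r (c - 1))) g) g

-- "for c in range(C): for r in range(1, R): delta[r][c] += delta[r-1][c]"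
def pvVPass (g : List (List Int)) (R C : Nat) : List (List Int) :=
  (PySem.List.pyRange 0 (C : Int)).foldl
    (fun g c => (PySem.List.pyRange 1 (R : Int)).foldl
      (fun g r => pvAdd2 g r c (pvGet2 g (r - 1) c)) g) g

def solution (board : List (List Int)) (skill : List (Int × Int × Int × Int × Int × Int)) : Int :=
  let R := board.length
  let C := (PySem.List.pyGetD board 0 []).length
  let delta0 := List.replicate (R + 1) (List.replicate (C + 1) (0 : Int))
  let delta1 := skill.foldl pvStamp delta0
  let delta2 := pvHPass delta1 R C
  let delta3 := pvVPass delta2 R C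
  (PySem.List.pyRange 0 (R : Int)).foldl
    (fun acc r => (PySem.List.pyRange 0 (C : Int)).foldl
      (fun acc c => acc + (if pvGet2 board r c + pvGet2 delta3 r c > 0 then 1 else 0)) acc) 0

-- ===== PORT B =====
-- B stamps the same corner marks, then sums delta over each cell's upper-left sub-rectangle
-- ("sum(delta[i][j] for i in range(r+1) for j in range(c+1))") instead of running prefix sums
def solution_alt (board : List (List Int)) (skill : List (Int × Int × Int × Int × Int × Int)) : Int :=
  let R := board.length
  let C := (PySem.List.pyGetD board 0 []).length
  let delta := skill.foldl pvStamp
    (List.replicate (R + 1) (List.replicate (C + 1) (0 : Int)))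
  (PySem.List.pyRange 0 (R : Int)).foldl
    (fun cnt r => (PySem.List.pyRange 0 (C : Int)).foldl
      (fun cnt c =>
        if pvGet2 board r c +
            (PySem.List.pyRange 0 (r + 1)).foldl
              (fun acc i => (PySem.List.pyRange 0 (c + 1)).foldl
                (fun acc j => acc + pvGet2 delta i j) acc) 0 > 0
        then cnt + 1 else cnt) cnt) 0

-- ===== PRECONDITION & SPEC =====
-- Pre_ is exactly the set of inputs on which the Python A returns (anywhere else A raises an
-- IndexError): a nonempty board whose rows are at least as long as row 0, and every skill's four
-- written positions rmin, rmax+1 (resp. cmin, cmax+1) inside Python's accepted index range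
-- [-(R+1), R] (resp. [-(C+1), C]) of the (R+1) x (C+1) difference array.
def Pre_solution (board : List (List Int)) (skill : List (Int × Int × Int × Int × Int × Int)) : Prop :=
  board ≠ [] ∧
  (∀ row ∈ board, (PySem.List.pyGetD board 0 []).length ≤ row.length) ∧
  (∀ s ∈ skill,
    -((board.length : Int) + 1) ≤ s.2.1 ∧ s.2.1 ≤ (board.length : Int) ∧
    -((board.length : Int) + 1) ≤ s.2.2.2.1 + 1 ∧ s.2.2.2.1 + 1 ≤ (board.length : Int) ∧
    -(((PySem.List.pyGetD board 0 []).length : Int) + 1) ≤ s.2.2.1 ∧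
    s.2.2.1 ≤ ((PySem.List.pyGetD board 0 []).length : Int) ∧
    -(((PySem.List.pyGetD board 0 []).length : Int) + 1) ≤ s.2.2.2.2.1 + 1 ∧
    s.2.2.2.2.1 + 1 ≤ ((PySem.List.pyGetD board 0 []).length : Int))
instance (board : List (List Int)) (skill : List (Int × Int × Int × Int × Int × Int)) : Decidable (Pre_solution board skill) := by unfold Pre_solution; infer_instance

def pvWitness_solution : List (List Int) × (List (Int × Int × Int × Int × Int × Int)) :=
  ([[1, 2], [3, -4]], [(1, 0, 0, 1, 1, 2), (0, 0, 1, 1, 1, 5)])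

def Spec_solution (board : List (List Int)) (skill : List (Int × Int × Int × Int × Int × Int)) (out : Int) : Prop := out = solution_alt board skill
instance (board : List (List Int)) (skill : List (Int × Int × Int × Int × Int × Int)) (out : Int) : Decidable (Spec_solution board skill out) := by unfold Spec_solution; infer_instance

-- ===== CLAIM (what is proved, stated in full; the proofs are below) =====
def Claim_equal_solution : Prop := ∀ (board : List (List Int)) (skill : List (Int × Int × Int × Int × Int × Int)), Dom_solution board skill → Pre_solution board skill → Spec_solution board skill (solution board skill)

-- ===== LEMMAS AND PROOFS =====

-- grid cell read by Nat indices (0 outside the grid)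
def gD (g : List (List Int)) (i j : Nat) : Int := (g.getD i []).getD j 0

-- the grid has m rows, each of length n
def Sh (g : List (List Int)) (m n : Nat) : Prop :=
  g.length = m ∧ ∀ i, i < m → (g.getD i []).length = n

-- sum of f over 0..n-1
def nsum (n : Nat) (f : Nat → Int) : Int := ((List.range n).map f).sum

lemma pvGet2_eq (g : List (List Int)) {r c : Int} (hr : 0 ≤ r) (hc : 0 ≤ c) :
    pvGet2 g r c = gD g r.toNat c.toNat := by
  simp [pvGet2, gD, PySem.List.pyGetD_of_nonneg _ _ hr, PySem.List.pyGetD_of_nonneg _ _ hc]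

lemma nsum_succ (n : Nat) (f : Nat → Int) : nsum (n + 1) f = nsum n f + f n := by
  simp [nsum, List.range_succ]

lemma nsum_congr {n : Nat} {f g : Nat → Int} (h : ∀ i, i < n → f i = g i) :
    nsum n f = nsum n g := by
  unfold nsum
  congr 1
  apply List.map_congr_left
  intro i hi
  exact h i (List.mem_range.mp hi)

lemma pvIdx_lt {i : Int} {n : Nat} (h1 : -(n : Int) ≤ i) (h2 : i < (n : Int)) :
    pvIdx i n < n := by
  unfold pvIdx; split <;> omega

lemma pvIdx_of_nonneg {i : Int} (hi : 0 ≤ i) (n : Nat) : pvIdx i n = i.toNat := by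
  simp [pvIdx]; omega

lemma getD_modify {α : Type} (l : List α) (k i : Nat) (f : α → α) (d : α) :
    (l.modify k f).getD i d = if k = i ∧ i < l.length then f (l.getD i d) else l.getD i d := by
  rw [List.getD_eq_getElem?_getD, List.getElem?_modify]
  by_cases h : i < l.length
  · have hg : l[i]? = some l[i] := List.getElem?_eq_getElem h
    by_cases hk : k = i <;> simp [hk, h, List.getD_eq_getElem?_getD]
  · have hg : l[i]? = none := by rw [List.getElem?_eq_none_iff]; omega
    simp [h, List.getD_eq_getElem?_getD]

-- ---- Sh facts ----

lemma Sh_pvAdd2 {g : List (List Int)} {m n : Nat} (hs : Sh g m n) (r c d : Int) :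
    Sh (pvAdd2 g r c d) m n := by
  obtain ⟨hlen, hrow⟩ := hs
  refine ⟨by simp [pvAdd2, List.length_modify, hlen], ?_⟩
  intro i hi
  unfold pvAdd2
  rw [getD_modify]
  split_ifs with h
  · rw [List.length_modify]; exact hrow i hi
  · exact hrow i hi

lemma Sh_pvStamp {g : List (List Int)} {m n : Nat} (hs : Sh g m n)
    (s : Int × Int × Int × Int × Int × Int) : Sh (pvStamp g s) m n := by
  unfold pvStamp
  exact Sh_pvAdd2 (Sh_pvAdd2 (Sh_pvAdd2 (Sh_pvAdd2 hs _ _ _) _ _ _) _ _ _) _ _ _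

lemma Sh_stamps {m n : Nat} :
    ∀ (skill : List (Int × Int × Int × Int × Int × Int)) (g : List (List Int)),
      Sh g m n → Sh (skill.foldl pvStamp g) m n := by
  intro skill
  induction skill with
  | nil => intro g hg; simpa using hg
  | cons s l ih => intro g hg; simpa using ih (pvStamp g s) (Sh_pvStamp hg s)

lemma Sh_delta0 (R C : Nat) :
    Sh (List.replicate (R + 1) (List.replicate (C + 1) (0 : Int))) (R + 1) (C + 1) := by
  refine ⟨by simp, ?_⟩
  intro i hi
  simp [List.getD_eq_getElem?_getD, hi]

-- ---- the pointwise effect of pvAdd2 ----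

lemma gD_pvAdd2 {g : List (List Int)} {m n : Nat} (hs : Sh g m n) {r c : Int} (d : Int)
    (hr0 : -(m : Int) ≤ r) (hrm : r < (m : Int)) (hc0 : -(n : Int) ≤ c) (hcn : c < (n : Int)) (i j : Nat) :
    gD (pvAdd2 g r c d) i j = gD g i j + (if i = pvIdx r m ∧ j = pvIdx c n then d else 0) := by
  obtain ⟨hlen, hrow⟩ := hs
  have hpr : pvIdx r m < m := pvIdx_lt hr0 hrm
  have hpc : pvIdx c n < n := pvIdx_lt hc0 hcn
  unfold pvAdd2 gD
  rw [hlen, getD_modify]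
  by_cases hir : pvIdx r m = i ∧ i < g.length
  · rw [if_pos hir]
    have hrowlen : (g.getD i []).length = n := hrow i (by omega)
    rw [hrowlen, getD_modify]
    by_cases hjc : pvIdx c n = j ∧ j < (g.getD i []).length
    · rw [if_pos hjc, if_pos (show i = pvIdx r m ∧ j = pvIdx c n from ⟨hir.1.symm, hjc.1.symm⟩)]
    · have hcond : ¬(i = pvIdx r m ∧ j = pvIdx c n) := by
        rw [hrowlen] at hjc
        rintro ⟨-, hj⟩
        exact hjc ⟨hj.symm, by omega⟩
      rw [if_neg hjc, if_neg hcond, add_zero]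
  · have hcond : ¬(i = pvIdx r m ∧ j = pvIdx c n) := by
      rw [hlen] at hir
      rintro ⟨hi, -⟩
      exact hir ⟨hi.symm, by omega⟩
    rw [if_neg hir, if_neg hcond, add_zero]

-- specialisation of gD_pvAdd2 to nonnegative indices (the prefix-sum passes)
lemma gD_pvAdd2_nn {g : List (List Int)} {m n : Nat} (hs : Sh g m n) {r c : Int} (d : Int)
    (hr0 : 0 ≤ r) (hrm : r < (m : Int)) (hc0 : 0 ≤ c) (hcn : c < (n : Int)) (i j : Nat) :
    gD (pvAdd2 g r c d) i j = gD g i j + (if (i : Int) = r ∧ (j : Int) = c then d else 0) := by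
  rw [gD_pvAdd2 hs d (by omega) hrm (by omega) hcn i j]
  congr 1
  refine if_congr ?_ rfl rfl
  rw [pvIdx_of_nonneg hr0, pvIdx_of_nonneg hc0]
  omega

-- ---- horizontal pass ----

lemma hInner (R C : Nat) {r : Int} (hr0 : 0 ≤ r) (hrR : r < (R : Int)) :
    ∀ (n : Nat), n ≤ C → ∀ g, Sh g (R + 1) (C + 1) →
      Sh ((PySem.List.pyRange 1 (n : Int)).foldl
            (fun g c => pvAdd2 g r c (pvGet2 g r (c - 1))) g) (R + 1) (C + 1) ∧
      ∀ i j, gD ((PySem.List.pyRange 1 (n : Int)).foldl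
            (fun g c => pvAdd2 g r c (pvGet2 g r (c - 1))) g) i j
        = if (i : Int) = r ∧ 1 ≤ j ∧ j < n then nsum (j + 1) (fun j' => gD g i j')
          else gD g i j := by
  intro n
  induction n with
  | zero =>
      intro _ g hg
      rw [PySem.List.pyRange_one_eq_nil (by norm_num)]
      refine ⟨by simpa using hg, ?_⟩
      intro i j
      simp
  | succ n ih =>
      intro hn g hg
      by_cases hn0 : n = 0
      · subst hn0
        rw [show (((0 : Nat) + 1 : Nat) : Int) = 1 by norm_num,
            PySem.List.pyRange_one_eq_nil (by norm_num)]
        refine ⟨by simpa using hg, ?_⟩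
        intro i j
        simp only [List.foldl_nil]
        rw [if_neg (show ¬((i : Int) = r ∧ 1 ≤ j ∧ j < 0 + 1) by omega)]
      · have h1n : (1 : Int) ≤ (n : Int) := by omega
        have hsplit : PySem.List.pyRange 1 ((n + 1 : Nat) : Int)
            = PySem.List.pyRange 1 (n : Int) ++ [(n : Int)] := by
          push_cast
          exact PySem.List.pyRange_one_succ_right h1n
        rw [hsplit, List.foldl_append]
        obtain ⟨ihSh, ihgD⟩ := ih (by omega) g hg
        simp only [List.foldl_cons, List.foldl_nil]
        refine ⟨Sh_pvAdd2 ihSh _ _ _, ?_⟩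
        intro i j
        have hval : pvGet2 ((PySem.List.pyRange 1 (n : Int)).foldl
              (fun g c => pvAdd2 g r c (pvGet2 g r (c - 1))) g) r ((n : Int) - 1)
            = nsum n (fun j' => gD g r.toNat j') := by
          rw [pvGet2_eq _ hr0 (by omega), ihgD]
          have htn : ((n : Int) - 1).toNat = n - 1 := by omega
          by_cases h2 : 2 ≤ n
          · have hcond : ((r.toNat : Nat) : Int) = r ∧ 1 ≤ ((n : Int) - 1).toNat ∧
                ((n : Int) - 1).toNat < n := by omega
            rw [if_pos hcond, htn]
            congr 1
            omega
          · have hcond : ¬(((r.toNat : Nat) : Int) = r ∧ 1 ≤ ((n : Int) - 1).toNat ∧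
                ((n : Int) - 1).toNat < n) := by omega
            rw [if_neg hcond, htn]
            rw [show n - 1 = 0 by omega, show n = 1 by omega]
            simp [nsum]
        rw [gD_pvAdd2_nn ihSh _ hr0 (by push_cast; omega) (by omega) (by push_cast; omega) i j,
            hval, ihgD i j]
        by_cases hc1 : (i : Int) = r ∧ (j : Int) = (n : Int)
        · have hnc : ¬((i : Int) = r ∧ 1 ≤ j ∧ j < n) := by omega
          have hpc : (i : Int) = r ∧ 1 ≤ j ∧ j < n + 1 := by omega
          rw [if_neg hnc, if_pos hc1, if_pos hpc]
          rw [show r.toNat = i by omega, show j = n by omega, nsum_succ]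
          ring
        · rw [if_neg hc1, add_zero]
          by_cases hc2 : (i : Int) = r ∧ 1 ≤ j ∧ j < n
          · have hc3 : (i : Int) = r ∧ 1 ≤ j ∧ j < n + 1 := by omega
            rw [if_pos hc2, if_pos hc3]
          · have hc3 : ¬((i : Int) = r ∧ 1 ≤ j ∧ j < n + 1) := by
              rintro ⟨ha, hb, hcc⟩
              have hjn : j ≠ n := fun h => hc1 ⟨ha, by rw [h]⟩
              exact hc2 ⟨ha, hb, by omega⟩
            rw [if_neg hc2, if_neg hc3]

lemma hPassAux (R C : Nat) :
    ∀ (k : Nat), k ≤ R → ∀ g, Sh g (R + 1) (C + 1) →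
      Sh ((PySem.List.pyRange 0 (k : Int)).foldl
            (fun g r => (PySem.List.pyRange 1 (C : Int)).foldl
              (fun g c => pvAdd2 g r c (pvGet2 g r (c - 1))) g) g) (R + 1) (C + 1) ∧
      ∀ i j, gD ((PySem.List.pyRange 0 (k : Int)).foldl
            (fun g r => (PySem.List.pyRange 1 (C : Int)).foldl
              (fun g c => pvAdd2 g r c (pvGet2 g r (c - 1))) g) g) i j
        = if i < k ∧ j < C then nsum (j + 1) (fun j' => gD g i j') else gD g i j := by
  intro k
  induction k with
  | zero =>
      intro _ g hg
      rw [show PySem.List.pyRange 0 (((0 : Nat) : Nat) : Int) = []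
            from PySem.List.pyRange_one_eq_nil (by norm_num)]
      refine ⟨by simpa using hg, ?_⟩
      intro i j
      simp
  | succ k ih =>
      intro hk g hg
      have hsplit : PySem.List.pyRange 0 ((k + 1 : Nat) : Int)
          = PySem.List.pyRange 0 (k : Int) ++ [(k : Int)] := by
        push_cast
        exact PySem.List.pyRange_one_succ_right (by omega)
      rw [hsplit, List.foldl_append]
      obtain ⟨ihSh, ihgD⟩ := ih (by omega) g hg
      simp only [List.foldl_cons, List.foldl_nil]
      obtain ⟨stSh, stgD⟩ := hInner R C (show (0 : Int) ≤ (k : Int) by omega)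
        (show ((k : Nat) : Int) < (R : Int) by omega) C (le_refl C) _ ihSh
      refine ⟨stSh, ?_⟩
      intro i j
      rw [stgD i j]
      by_cases hik : i = k
      · subst hik
        have hrow : ∀ j', gD ((PySem.List.pyRange 0 (i : Int)).foldl
              (fun g r => (PySem.List.pyRange 1 (C : Int)).foldl
                (fun g c => pvAdd2 g r c (pvGet2 g r (c - 1))) g) g) i j' = gD g i j' := by
          intro j'
          rw [ihgD]
          have : ¬(i < i ∧ j' < C) := by omega
          rw [if_neg this]
        by_cases hj : 1 ≤ j ∧ j < C
        · have hcnd : ((i : Nat) : Int) = (i : Int) ∧ 1 ≤ j ∧ j < C := ⟨rfl, hj⟩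
          rw [if_pos hcnd, if_pos (show i < i + 1 ∧ j < C by omega)]
          apply nsum_congr
          intro j' _
          exact hrow j'
        · have hcnd : ¬(((i : Nat) : Int) = (i : Int) ∧ 1 ≤ j ∧ j < C) := by
            rintro ⟨_, h⟩; exact hj h
          rw [if_neg hcnd, hrow j]
          by_cases hj0 : j = 0 ∧ j < C
          · obtain ⟨hj0', hjC⟩ := hj0
            subst hj0'
            rw [if_pos (show i < i + 1 ∧ 0 < C by omega)]
            simp [nsum]
          · rw [if_neg (by omega)]
      · have hcnd : ¬(((i : Nat) : Int) = (k : Int) ∧ 1 ≤ j ∧ j < C) := by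
          rintro ⟨h, _⟩
          exact hik (by exact_mod_cast h)
        rw [if_neg hcnd, ihgD]
        by_cases hc : i < k ∧ j < C
        · rw [if_pos hc, if_pos (by omega)]
        · rw [if_neg hc, if_neg (by omega)]

-- ---- vertical pass ----

lemma vInner (R C : Nat) {c : Int} (hc0 : 0 ≤ c) (hcC : c < (C : Int)) :
    ∀ (n : Nat), n ≤ R → ∀ g, Sh g (R + 1) (C + 1) →
      Sh ((PySem.List.pyRange 1 (n : Int)).foldl
            (fun g r => pvAdd2 g r c (pvGet2 g (r - 1) c)) g) (R + 1) (C + 1) ∧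
      ∀ i j, gD ((PySem.List.pyRange 1 (n : Int)).foldl
            (fun g r => pvAdd2 g r c (pvGet2 g (r - 1) c)) g) i j
        = if (j : Int) = c ∧ 1 ≤ i ∧ i < n then nsum (i + 1) (fun i' => gD g i' j)
          else gD g i j := by
  intro n
  induction n with
  | zero =>
      intro _ g hg
      rw [PySem.List.pyRange_one_eq_nil (by norm_num)]
      refine ⟨by simpa using hg, ?_⟩
      intro i j
      simp
  | succ n ih =>
      intro hn g hg
      by_cases hn0 : n = 0
      · subst hn0
        rw [show (((0 : Nat) + 1 : Nat) : Int) = 1 by norm_num,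
            PySem.List.pyRange_one_eq_nil (by norm_num)]
        refine ⟨by simpa using hg, ?_⟩
        intro i j
        simp only [List.foldl_nil]
        rw [if_neg (show ¬((j : Int) = c ∧ 1 ≤ i ∧ i < 0 + 1) by omega)]
      · have h1n : (1 : Int) ≤ (n : Int) := by omega
        have hsplit : PySem.List.pyRange 1 ((n + 1 : Nat) : Int)
            = PySem.List.pyRange 1 (n : Int) ++ [(n : Int)] := by
          push_cast
          exact PySem.List.pyRange_one_succ_right h1n
        rw [hsplit, List.foldl_append]
        obtain ⟨ihSh, ihgD⟩ := ih (by omega) g hg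
        simp only [List.foldl_cons, List.foldl_nil]
        refine ⟨Sh_pvAdd2 ihSh _ _ _, ?_⟩
        intro i j
        have hval : pvGet2 ((PySem.List.pyRange 1 (n : Int)).foldl
              (fun g r => pvAdd2 g r c (pvGet2 g (r - 1) c)) g) ((n : Int) - 1) c
            = nsum n (fun i' => gD g i' c.toNat) := by
          rw [pvGet2_eq _ (by omega) hc0, ihgD]
          have htn : ((n : Int) - 1).toNat = n - 1 := by omega
          by_cases h2 : 2 ≤ n
          · have hcond : ((c.toNat : Nat) : Int) = c ∧ 1 ≤ ((n : Int) - 1).toNat ∧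
                ((n : Int) - 1).toNat < n := by omega
            rw [if_pos hcond, htn]
            congr 1
            omega
          · have hcond : ¬(((c.toNat : Nat) : Int) = c ∧ 1 ≤ ((n : Int) - 1).toNat ∧
                ((n : Int) - 1).toNat < n) := by omega
            rw [if_neg hcond, htn]
            rw [show n - 1 = 0 by omega, show n = 1 by omega]
            simp [nsum]
        rw [gD_pvAdd2_nn ihSh _ (by omega) (by push_cast; omega) hc0 (by push_cast; omega) i j,
            hval, ihgD i j]
        by_cases hc1 : (i : Int) = (n : Int) ∧ (j : Int) = c
        · have hnc : ¬((j : Int) = c ∧ 1 ≤ i ∧ i < n) := by omega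
          have hpc : (j : Int) = c ∧ 1 ≤ i ∧ i < n + 1 := by omega
          rw [if_neg hnc, if_pos hc1, if_pos hpc]
          rw [show c.toNat = j by omega, show i = n by omega, nsum_succ]
          ring
        · rw [if_neg hc1, add_zero]
          by_cases hc2 : (j : Int) = c ∧ 1 ≤ i ∧ i < n
          · have hc3 : (j : Int) = c ∧ 1 ≤ i ∧ i < n + 1 := by omega
            rw [if_pos hc2, if_pos hc3]
          · have hc3 : ¬((j : Int) = c ∧ 1 ≤ i ∧ i < n + 1) := by
              rintro ⟨ha, hb, hcc⟩
              have hin : i ≠ n := fun h => hc1 ⟨by rw [h], ha⟩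
              exact hc2 ⟨ha, hb, by omega⟩
            rw [if_neg hc2, if_neg hc3]

lemma vPassAux (R C : Nat) :
    ∀ (k : Nat), k ≤ C → ∀ g, Sh g (R + 1) (C + 1) →
      Sh ((PySem.List.pyRange 0 (k : Int)).foldl
            (fun g c => (PySem.List.pyRange 1 (R : Int)).foldl
              (fun g r => pvAdd2 g r c (pvGet2 g (r - 1) c)) g) g) (R + 1) (C + 1) ∧
      ∀ i j, gD ((PySem.List.pyRange 0 (k : Int)).foldl
            (fun g c => (PySem.List.pyRange 1 (R : Int)).foldl
              (fun g r => pvAdd2 g r c (pvGet2 g (r - 1) c)) g) g) i j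
        = if j < k ∧ i < R then nsum (i + 1) (fun i' => gD g i' j) else gD g i j := by
  intro k
  induction k with
  | zero =>
      intro _ g hg
      rw [show PySem.List.pyRange 0 (((0 : Nat) : Nat) : Int) = []
            from PySem.List.pyRange_one_eq_nil (by norm_num)]
      refine ⟨by simpa using hg, ?_⟩
      intro i j
      simp
  | succ k ih =>
      intro hk g hg
      have hsplit : PySem.List.pyRange 0 ((k + 1 : Nat) : Int)
          = PySem.List.pyRange 0 (k : Int) ++ [(k : Int)] := by
        push_cast
        exact PySem.List.pyRange_one_succ_right (by omega)
      rw [hsplit, List.foldl_append]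
      obtain ⟨ihSh, ihgD⟩ := ih (by omega) g hg
      simp only [List.foldl_cons, List.foldl_nil]
      obtain ⟨stSh, stgD⟩ := vInner R C (show (0 : Int) ≤ (k : Int) by omega)
        (show ((k : Nat) : Int) < (C : Int) by omega) R (le_refl R) _ ihSh
      refine ⟨stSh, ?_⟩
      intro i j
      rw [stgD i j]
      by_cases hjk : j = k
      · subst hjk
        have hcol : ∀ i', gD ((PySem.List.pyRange 0 (j : Int)).foldl
              (fun g c => (PySem.List.pyRange 1 (R : Int)).foldl
                (fun g r => pvAdd2 g r c (pvGet2 g (r - 1) c)) g) g) i' j = gD g i' j := by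
          intro i'
          rw [ihgD]
          have : ¬(j < j ∧ i' < R) := by omega
          rw [if_neg this]
        by_cases hi : 1 ≤ i ∧ i < R
        · have hcnd : ((j : Nat) : Int) = (j : Int) ∧ 1 ≤ i ∧ i < R := ⟨rfl, hi⟩
          rw [if_pos hcnd, if_pos (show j < j + 1 ∧ i < R by omega)]
          apply nsum_congr
          intro i' _
          exact hcol i'
        · have hcnd : ¬(((j : Nat) : Int) = (j : Int) ∧ 1 ≤ i ∧ i < R) := by
            rintro ⟨_, h⟩; exact hi h
          rw [if_neg hcnd, hcol i]
          by_cases hi0 : i = 0 ∧ i < R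
          · obtain ⟨hi0', hiR⟩ := hi0
            subst hi0'
            rw [if_pos (show j < j + 1 ∧ 0 < R by omega)]
            simp [nsum]
          · rw [if_neg (by omega)]
      · have hcnd : ¬(((j : Nat) : Int) = (k : Int) ∧ 1 ≤ i ∧ i < R) := by
          rintro ⟨h, _⟩
          exact hjk (by exact_mod_cast h)
        rw [if_neg hcnd, ihgD]
        by_cases hc : j < k ∧ i < R
        · rw [if_pos hc, if_pos (by omega)]
        · rw [if_neg hc, if_neg (by omega)]

-- ---- B's direct summation ----

lemma foldl_pyRange_add (f : Int → Int) :
    ∀ (n : Nat) (b : Int), (PySem.List.pyRange 0 (n : Int)).foldl (fun acc i => acc + f i) b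
      = b + nsum n (fun k => f (k : Int)) := by
  intro n
  induction n with
  | zero =>
      intro b
      rw [show PySem.List.pyRange 0 (((0 : Nat) : Nat) : Int) = []
            from PySem.List.pyRange_one_eq_nil (by norm_num)]
      simp [nsum]
  | succ n ih =>
      intro b
      rw [show PySem.List.pyRange 0 ((n + 1 : Nat) : Int)
            = PySem.List.pyRange 0 (n : Int) ++ [(n : Int)] by
          push_cast; exact PySem.List.pyRange_one_succ_right (by omega),
        List.foldl_append]
      simp only [List.foldl_cons, List.foldl_nil]
      rw [ih, nsum_succ]
      ring

lemma double_sum (delta : List (List Int)) {r c : Int} (hr : 0 ≤ r) (hc : 0 ≤ c) :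
    (PySem.List.pyRange 0 (r + 1)).foldl
      (fun acc i => (PySem.List.pyRange 0 (c + 1)).foldl
        (fun acc j => acc + pvGet2 delta i j) acc) 0
    = nsum (r.toNat + 1) (fun i => nsum (c.toNat + 1) (fun j => gD delta i j)) := by
  have hinner : ∀ (i : Int), 0 ≤ i → ∀ b : Int,
      (PySem.List.pyRange 0 (c + 1)).foldl (fun acc j => acc + pvGet2 delta i j) b
        = b + nsum (c.toNat + 1) (fun j => gD delta i.toNat j) := by
    intro i hi b
    rw [show c + 1 = ((c.toNat + 1 : Nat) : Int) by omega, foldl_pyRange_add]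
    congr 1
    apply nsum_congr
    intro j _
    rw [pvGet2_eq _ hi (by omega)]
    congr 1
  have houter : (PySem.List.pyRange 0 (r + 1)).foldl
      (fun acc i => (PySem.List.pyRange 0 (c + 1)).foldl
        (fun acc j => acc + pvGet2 delta i j) acc) 0
      = (PySem.List.pyRange 0 (r + 1)).foldl
        (fun acc i => acc + nsum (c.toNat + 1) (fun j => gD delta i.toNat j)) 0 := by
    apply PySem.List.foldl_congr_mem
    intro acc i hi
    rw [PySem.List.mem_pyRange_one] at hi
    exact hinner i (by omega) acc
  rw [houter, show r + 1 = ((r.toNat + 1 : Nat) : Int) by omega, foldl_pyRange_add, zero_add]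
  apply nsum_congr
  intro i _
  congr 1

-- ===== VERDICT (by name: the statement is the Claim_ definition above) =====
theorem solution_spec : Claim_equal_solution := by
  intro board skill _ _
  unfold Spec_solution solution solution_alt
  apply PySem.List.foldl_congr_mem
  intro acc r hr
  apply PySem.List.foldl_congr_mem
  intro acc c hc
  rw [PySem.List.mem_pyRange_one] at hr hc
  have hSh1 : Sh (skill.foldl pvStamp
      (List.replicate (board.length + 1)
        (List.replicate ((PySem.List.pyGetD board 0 []).length + 1) (0 : Int))))
      (board.length + 1) ((PySem.List.pyGetD board 0 []).length + 1) :=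
    Sh_stamps skill _ (Sh_delta0 board.length (PySem.List.pyGetD board 0 []).length)
  obtain ⟨hSh2, hgD2⟩ := hPassAux board.length (PySem.List.pyGetD board 0 []).length
    board.length (le_refl _) _ hSh1
  obtain ⟨-, hgD3⟩ := vPassAux board.length (PySem.List.pyGetD board 0 []).length
    (PySem.List.pyGetD board 0 []).length (le_refl _) _ hSh2
  have hval : pvGet2 (pvVPass (pvHPass (skill.foldl pvStamp
        (List.replicate (board.length + 1)
          (List.replicate ((PySem.List.pyGetD board 0 []).length + 1) (0 : Int))))
      board.length (PySem.List.pyGetD board 0 []).length)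
      board.length (PySem.List.pyGetD board 0 []).length) r c
      = nsum (r.toNat + 1) (fun i => nsum (c.toNat + 1) (fun j =>
          gD (skill.foldl pvStamp
            (List.replicate (board.length + 1)
              (List.replicate ((PySem.List.pyGetD board 0 []).length + 1) (0 : Int)))) i j)) := by
    rw [pvGet2_eq _ (by omega) (by omega)]
    unfold pvVPass pvHPass
    rw [hgD3 r.toNat c.toNat, if_pos ⟨by omega, by omega⟩]
    apply nsum_congr
    intro i' hi'
    rw [hgD2 i' c.toNat, if_pos ⟨by omega, by omega⟩]
  rw [hval, double_sum _ (by omega : (0:Int) ≤ r) (by omega : (0:Int) ≤ c)]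
  by_cases h : pvGet2 board r c
      + nsum (r.toNat + 1) (fun i => nsum (c.toNat + 1) (fun j =>
          gD (skill.foldl pvStamp
            (List.replicate (board.length + 1)
              (List.replicate ((PySem.List.pyGetD board 0 []).length + 1) (0 : Int)))) i j)) > 0
  · rw [if_pos h, if_pos h]
  · rw [if_neg h, if_neg h]
    ring
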